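-- pv_equiv track=rewrite | github.com/jeremybrice/cvd | ai_services/core/scoring.py | _same_category
-- ===== SOURCE A (Python) =====
-- def _same_category(product1: int, product2: int) -> bool:
--     """Check if two products are in the same category"""
--     # Simplified category mapping
--     categories = {
--         "beverages": [1, 2, 3, 4],
--         "snacks": [5, 6, 7, 8],
--         "candy": [9, 10, 11, 12]
--     }
--
--     for category, products in categories.items():
--         if product1 in products and product2 in products:
--             return True
--
--     return False
-- ===== SOURCE B (Python) =====
-- def _same_category(product1: int, product2: int) -> bool:
--     """Check if two products are in the same category"""
--     # Inverted index: product -> category, built once from the same mapping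
--     lookup = {
--         1: "beverages", 2: "beverages", 3: "beverages", 4: "beverages",
--         5: "snacks", 6: "snacks", 7: "snacks", 8: "snacks",
--         9: "candy", 10: "candy", 11: "candy", 12: "candy",
--     }
--     cat1 = lookup.get(product1)
--     cat2 = lookup.get(product2)
--     return cat1 is not None and cat1 == cat2
-- ===== Notes on version B (the rewrite author's own statement) =====
-- stated objective: idiomatic
-- what changed: Replaces the per-category loop with both-membership scans by an inverted product-to-category dict built once, two direct lookups and one guarded equality comparison.
import Mathlib
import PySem

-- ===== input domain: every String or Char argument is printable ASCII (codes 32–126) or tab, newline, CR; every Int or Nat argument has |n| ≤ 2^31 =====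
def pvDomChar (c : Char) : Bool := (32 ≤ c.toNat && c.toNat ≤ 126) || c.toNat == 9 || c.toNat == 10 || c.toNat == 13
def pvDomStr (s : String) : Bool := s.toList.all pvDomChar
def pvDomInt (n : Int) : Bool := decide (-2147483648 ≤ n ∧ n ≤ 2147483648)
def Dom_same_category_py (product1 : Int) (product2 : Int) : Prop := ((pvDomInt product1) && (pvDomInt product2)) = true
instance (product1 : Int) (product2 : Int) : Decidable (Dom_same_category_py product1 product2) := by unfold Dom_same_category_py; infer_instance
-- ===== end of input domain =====

-- B replaces A's per-category both-membership scan loop with an inverted product->category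
-- dict built once and two direct lookups plus one guarded equality (idiomatic rewrite).
-- ===== PORT A =====
-- Port of A: iterate over the category -> products mapping, return true on the
-- first category containing both products.
def pvCatLoop (product1 : Int) (product2 : Int) : List (String × List Int) → Bool
  | [] => false
  | (_, products) :: rest =>
      if products.contains product1 && products.contains product2 then true
      else pvCatLoop product1 product2 rest

def same_category_py (product1 : Int) (product2 : Int) : Bool :=
  let categories : List (String × List Int) :=
    [("beverages", [1, 2, 3, 4]), ("snacks", [5, 6, 7, 8]), ("candy", [9, 10, 11, 12])]
  pvCatLoop product1 product2 categories

-- ===== PORT B =====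
-- Port of B: inverted product -> category index, two lookups, guarded equality.
def pvLookup : PySem.Dict Int String :=
  PySem.Dict.ofList
  [(1, "beverages"), (2, "beverages"), (3, "beverages"), (4, "beverages"),
   (5, "snacks"), (6, "snacks"), (7, "snacks"), (8, "snacks"),
   (9, "candy"), (10, "candy"), (11, "candy"), (12, "candy")]

def same_category_py_alt (product1 : Int) (product2 : Int) : Bool :=
  let cat1 := PySem.Dict.get? pvLookup product1
  let cat2 := PySem.Dict.get? pvLookup product2
  cat1.isSome && cat1 == cat2

-- ===== PRECONDITION & SPEC =====
def Spec_same_category_py (product1 : Int) (product2 : Int) (out : Bool) : Prop := out = same_category_py_alt product1 product2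
instance (product1 : Int) (product2 : Int) (out : Bool) : Decidable (Spec_same_category_py product1 product2 out) := by unfold Spec_same_category_py; infer_instance

-- ===== CLAIM (what is proved, stated in full; the proofs are below) =====
def Claim_equal_same_category_py : Prop := ∀ (product1 : Int) (product2 : Int), Dom_same_category_py product1 product2 → Spec_same_category_py product1 product2 (same_category_py product1 product2)

-- ===== LEMMAS AND PROOFS =====
theorem pvLookup_get?_none (p : Int) (h : ¬(1 ≤ p ∧ p ≤ 12)) :
    PySem.Dict.get? pvLookup p = none := by
  have hitems : pvLookup.items =
      [((1:Int),"beverages"),((2:Int),"beverages"),((3:Int),"beverages"),((4:Int),"beverages"),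
       ((5:Int),"snacks"),((6:Int),"snacks"),((7:Int),"snacks"),((8:Int),"snacks"),
       ((9:Int),"candy"),((10:Int),"candy"),((11:Int),"candy"),((12:Int),"candy")] := rfl
  simp [PySem.Dict.get?, hitems, List.find?_eq_none]
  omega

-- ===== VERDICT (by name: the statement is the Claim_ definition above) =====
theorem same_category_py_spec : Claim_equal_same_category_py := by
  intro p1 p2 _
  unfold Spec_same_category_py
  by_cases h1 : 1 ≤ p1 ∧ p1 ≤ 12
  · by_cases h2 : 1 ≤ p2 ∧ p2 ≤ 12
    · obtain ⟨a, b⟩ := h1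
      obtain ⟨c, d⟩ := h2
      interval_cases p1 <;> interval_cases p2 <;> decide
    · have hget : PySem.Dict.get? pvLookup p2 = none := pvLookup_get?_none p2 h2
      have halt : same_category_py_alt p1 p2 = false := by
        cases hc : PySem.Dict.get? pvLookup p1 <;>
          simp [same_category_py_alt, hget, hc]
      have ha : same_category_py p1 p2 = false := by
        simp [same_category_py, pvCatLoop]
        omega
      rw [ha, halt]
  · have hget : PySem.Dict.get? pvLookup p1 = none := pvLookup_get?_none p1 h1
    have halt : same_category_py_alt p1 p2 = false := by
      simp [same_category_py_alt, hget]
    have ha : same_category_py p1 p2 = false := by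
      simp [same_category_py, pvCatLoop]
      omega
    rw [ha, halt]
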